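-- pv_equiv track=rewrite | github.com/thilankadw/Agentic_Memory_Design_Week-07_08_AEE_Bootcamp-Zuu_Crew- | src/services/crm_service/llm_data_generator.py | _fallback_notes
-- ===== SOURCE A (Python) =====
-- from typing import List, Dict
--
-- def _fallback_notes(n: int) -> List[str]:
--     """Fallback medical notes if LLM fails."""
--     notes = [
--         "No known allergies. Regular checkups recommended.",
--         "Hypertension, on medication. Monitor BP regularly.",
--         "Diabetes mellitus type 2. Diet-controlled.",
--         "Asthma, uses inhaler PRN.",
--         "No significant medical history.",
--     ]
--     return [notes[i % len(notes)] for i in range(n)]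
-- ===== SOURCE B (Python) =====
-- from typing import List
--
-- def _fallback_notes(n: int) -> List[str]:
--     """Fallback medical notes if LLM fails."""
--     notes = [
--         "No known allergies. Regular checkups recommended.",
--         "Hypertension, on medication. Monitor BP regularly.",
--         "Diabetes mellitus type 2. Diet-controlled.",
--         "Asthma, uses inhaler PRN.",
--         "No significant medical history.",
--     ]
--     reps = max(0, -(-n // len(notes)))
--     return (notes * reps)[:n]
-- ===== Notes on version B (the rewrite author's own statement) =====
-- stated objective: simpler
-- what changed: Replaces the per-element modulo-indexed comprehension over range(n) with one replication of the 5-template block (ceiling-divided repetition count, clamped to 0) followed by a single slice to length n.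
import Mathlib
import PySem

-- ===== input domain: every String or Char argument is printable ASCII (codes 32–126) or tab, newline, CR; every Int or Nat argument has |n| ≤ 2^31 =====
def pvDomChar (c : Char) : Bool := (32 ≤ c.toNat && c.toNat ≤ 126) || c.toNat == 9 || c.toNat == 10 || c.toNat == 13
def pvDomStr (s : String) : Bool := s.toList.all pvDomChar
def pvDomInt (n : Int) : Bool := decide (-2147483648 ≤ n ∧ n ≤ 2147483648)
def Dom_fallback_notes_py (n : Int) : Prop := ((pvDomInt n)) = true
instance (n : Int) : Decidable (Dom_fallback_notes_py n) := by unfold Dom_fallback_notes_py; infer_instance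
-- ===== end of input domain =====

-- B replaces A's per-element modulo-indexed comprehension by one replication of the
-- 5-template block plus a single slice (objective: simpler).

-- ===== PORT A =====
def pvNotes : List String :=
  [ "No known allergies. Regular checkups recommended.",
    "Hypertension, on medication. Monitor BP regularly.",
    "Diabetes mellitus type 2. Diet-controlled.",
    "Asthma, uses inhaler PRN.",
    "No significant medical history." ]

-- [notes[i % len(notes)] for i in range(n)]; the index i % 5 always lies in
-- range, so pyGetD's default is never used (exact).
def fallback_notes_py (n : Int) : List String :=
  (PySem.List.pyRange 0 n 1).map
    (fun i => PySem.List.pyGetD pvNotes (PySem.Int.mod i (pvNotes.length : Int)) "")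

-- ===== PORT B =====
-- reps = max(0, -(-n // len(notes))); return (notes * reps)[:n]
def fallback_notes_py_alt (n : Int) : List String :=
  let reps : Int := max 0 (-(PySem.Int.floordiv (-n) (pvNotes.length : Int)))
  PySem.List.slice (PySem.List.pyRepeat pvNotes reps) none (some n)

-- ===== PRECONDITION & SPEC =====
def Spec_fallback_notes_py (n : Int) (out : List String) : Prop := out = fallback_notes_py_alt n
instance (n : Int) (out : List String) : Decidable (Spec_fallback_notes_py n out) := by unfold Spec_fallback_notes_py; infer_instance

-- ===== CLAIM (what is proved, stated in full; the proofs are below) =====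
def Claim_equal_fallback_notes_py : Prop := ∀ (n : Int), Dom_fallback_notes_py n → Spec_fallback_notes_py n (fallback_notes_py n)

-- ===== LEMMAS AND PROOFS =====

def pvF (k : Nat) : String := pvNotes.getD (k % 5) ""

theorem pvF_base : (List.range 5).map pvF = pvNotes := by decide

theorem pvF_shift (k : Nat) : pvF (5 + k) = pvF k := by
  simp [pvF, Nat.add_mod_left]

theorem pv_main : ∀ (r m : Nat), m ≤ 5 * r →
    (List.range m).map pvF = ((List.replicate r pvNotes).flatten).take m := by
  intro r
  induction r with
  | zero =>
      intro m hm
      interval_cases m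
      simp
  | succ r ih =>
      intro m hm
      rw [List.replicate_succ, List.flatten_cons]
      by_cases h5 : m ≤ 5
      · rw [List.take_append_of_le_length (by simpa [pvNotes] using h5)]
        interval_cases m <;> decide
      · push_neg at h5
        obtain ⟨k, rfl⟩ : ∃ k, m = 5 + k := ⟨m - 5, by omega⟩
        rw [List.range_add, List.map_append, List.map_map]
        have : pvF ∘ (fun x => 5 + x) = pvF := by
          funext x; simp [pvF_shift]
        rw [this, pvF_base, ih k (by omega)]
        have hlen : (5 : Nat) + k = pvNotes.length + k := by simp [pvNotes]
        rw [hlen, List.take_append]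
        simp

theorem pv_mod_cast (k : Nat) :
    PySem.List.pyGetD pvNotes (PySem.Int.mod (0 + (k : Int)) (pvNotes.length : Int)) "" = pvF k := by
  rw [zero_add]
  rw [show ((pvNotes.length : Int)) = ((5 : Nat) : Int) by simp [pvNotes]]
  rw [PySem.Int.mod_natCast, PySem.List.pyGetD_natCast]
  rfl

-- ===== VERDICT (by name: the statement is the Claim_ definition above) =====
theorem fallback_notes_py_spec : Claim_equal_fallback_notes_py := by
  intro n _
  unfold Spec_fallback_notes_py fallback_notes_py fallback_notes_py_alt
  by_cases hn : n ≤ 0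
  · -- empty result on both sides
    have hq : 0 ≤ PySem.Int.floordiv (-n) (pvNotes.length : Int) := by
      rw [show ((pvNotes.length : Int)) = 5 by simp [pvNotes]]
      rw [PySem.Int.floordiv_eq_ediv_of_pos (by omega)]
      exact Int.ediv_nonneg (by omega) (by omega)
    have hreps : max 0 (-(PySem.Int.floordiv (-n) (pvNotes.length : Int))) = 0 := by omega
    rw [PySem.List.pyRange_one_eq_nil hn, hreps]
    simp [PySem.List.pyRepeat, PySem.List.slice]
  · push_neg at hn
    set q : Int := -(PySem.Int.floordiv (-n) (pvNotes.length : Int)) with hqdef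
    have hq5 : ((pvNotes.length : Int)) = 5 := by simp [pvNotes]
    have hbr : (q - 1) * 5 < n ∧ n ≤ q * 5 := by
      have := (PySem.Int.neg_floordiv_neg_eq_iff_of_pos (a := n) (b := 5)
        (q := q) (by omega)).mp (by rw [hqdef, hq5])
      exact this
    have hqpos : 0 < q := by nlinarith [hbr.1, hbr.2]
    have hmax : max 0 q = q := by omega
    -- abbreviations on the Nat side
    have hcast : q = ((q.toNat : Nat) : Int) := by omega
    have hm : n = ((n.toNat : Nat) : Int) := by omega
    have hle : n.toNat ≤ 5 * q.toNat := by omega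
    rw [hmax]
    rw [PySem.List.pyRange_one, List.map_map]
    have hf : (fun i => PySem.List.pyGetD pvNotes (PySem.Int.mod i (pvNotes.length : Int)) "") ∘
        (fun k : Nat => (0 : Int) + (k : Int)) = pvF := by
      funext k; exact pv_mod_cast k
    rw [show (n - 0 : Int) = n by ring, hf]
    show List.map pvF (List.range n.toNat) =
      PySem.List.slice (PySem.List.pyRepeat pvNotes q) none (some n)
    rw [show PySem.List.pyRepeat pvNotes q = ((List.replicate q.toNat pvNotes).flatten) from rfl]
    rw [PySem.List.slice_to ((List.replicate q.toNat pvNotes).flatten) (b := n) (le_of_lt hn)]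
    exact pv_main q.toNat n.toNat hle
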